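-- pv_equiv track=rewrite | github.com/SimfikDuke/codeforces | codeforces/82A.py | f
-- ===== SOURCE A (Python) =====
-- names = {
--         0 : 'Sheldon',
--         1 : 'Leonard',
--         2 : 'Penny',
--         3 : 'Rajesh',
--         4 : 'Howard'
--         }
--
-- def f(n):
--     n -= 1
--     m = 0
--     i = 1
--
--
--
--     while m + i * 5 <= n:
--         m += i * 5
--         i *= 2
--
--     ans = int((n-m)/i)
--
--     return names[ans]
-- ===== SOURCE B (Python) =====
-- def f(n):
--     d = n - 1
--     k = ((d // 5) + 1).bit_length() - 1
--     i = 1 << k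
--     return ['Sheldon', 'Leonard', 'Penny', 'Rajesh', 'Howard'][(d - 5 * (i - 1)) // i]
-- ===== Notes on version B (the rewrite author's own statement) =====
-- stated objective: simpler
-- what changed: Replaces the doubling while-loop that searches for the group block with a closed-form bit_length computation of the block index (k = (((n-1)//5)+1).bit_length()-1), indexing a plain list instead of a dict.
-- outside the precondition, e.g. on f(0): A raises KeyError, B raises ValueError; on f(-5): A raises KeyError, B raises IndexError
import Mathlib
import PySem

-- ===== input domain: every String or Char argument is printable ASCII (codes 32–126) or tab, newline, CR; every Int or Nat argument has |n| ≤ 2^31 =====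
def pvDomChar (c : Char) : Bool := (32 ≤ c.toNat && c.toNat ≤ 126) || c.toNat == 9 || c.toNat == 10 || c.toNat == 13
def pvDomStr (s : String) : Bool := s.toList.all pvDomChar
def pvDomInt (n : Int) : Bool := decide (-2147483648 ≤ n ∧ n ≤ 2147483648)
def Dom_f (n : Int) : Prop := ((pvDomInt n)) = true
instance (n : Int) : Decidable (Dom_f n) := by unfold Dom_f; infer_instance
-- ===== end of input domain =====

-- B replaces A's doubling search loop with a closed-form bit_length computation of the
-- block index (objective: simpler / O(1) arithmetic instead of the loop).

-- ===== PORT A =====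
-- A's while loop: m accumulates 5*i, i doubles.  The '0 < i' conjunct is a totality guard
-- (i starts at 1 and only doubles, so it always holds on reachable states).
def loopA (n m i : Int) : Int × Int :=
  if _h : 0 < i ∧ m + i * 5 ≤ n then loopA n (m + i * 5) (i * 2) else (m, i)
  termination_by (n - m).toNat
  decreasing_by omega

-- names dict lookup: KeyError → none, excluded by Pre_f (getD "" is never reached inside Pre_f).
-- int((n-m)/i): under Pre_f, 0 ≤ n-m < 5*i and both operands < 2^35, so CPython's float
-- division followed by int() truncation equals floor division exactly; ported as floordiv.
def f (n : Int) : String :=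
  let n' := n - 1
  let p := loopA n' 0 1
  let ans := PySem.Int.floordiv (n' - p.1) p.2
  ((PySem.Dict.ofList [((0 : Int), "Sheldon"), (1, "Leonard"), (2, "Penny"), (3, "Rajesh"),
      (4, "Howard")]).get? ans).getD ""

-- ===== PORT B =====
-- bit_length → PySem.Int.bitLength (Python-exact); 'k - 1' is Nat subtraction: under Pre_f
-- the argument is ≥ 1 so bit_length ≥ 1 and this matches Python (k = -1 raises, outside Pre_f).
-- list indexing [..][ans] → PySem.List.pyGet? (IndexError → none, excluded by Pre_f).
def f_alt (n : Int) : String :=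
  let d := n - 1
  let k := PySem.Int.bitLength (PySem.Int.floordiv d 5 + 1) - 1
  let i : Int := 2 ^ k
  (PySem.List.pyGet? ["Sheldon", "Leonard", "Penny", "Rajesh", "Howard"]
      (PySem.Int.floordiv (d - 5 * (i - 1)) i)).getD ""

-- ===== PRECONDITION & SPEC =====
-- Pre_f: exactly the inputs where A returns normally; for every n ≤ 0 A raises KeyError.
def Pre_f (n : Int) : Prop := 1 ≤ n
instance (n : Int) : Decidable (Pre_f n) := by unfold Pre_f; infer_instance
def pvWitness_f : Int := (6)

def Spec_f (n : Int) (out : String) : Prop := out = f_alt n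
instance (n : Int) (out : String) : Decidable (Spec_f n out) := by unfold Spec_f; infer_instance

-- ===== CLAIM (what is proved, stated in full; the proofs are below) =====
def Claim_equal_f : Prop := ∀ (n : Int), Dom_f n → Pre_f n → Spec_f n (f n)

-- ===== LEMMAS AND PROOFS =====

-- A's loop, started at block j (m = 5*(2^j-1), i = 2^j), stops at the unique block k with
-- 5*(2^k-1) ≤ n < 5*(2^(k+1)-1).
theorem loopA_spec (n : Int) (j : Nat) (hj : 5 * ((2 : Int) ^ j - 1) ≤ n) :
    ∃ k : Nat, loopA n (5 * ((2 : Int) ^ j - 1)) ((2 : Int) ^ j)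
        = (5 * ((2 : Int) ^ k - 1), (2 : Int) ^ k) ∧
      5 * ((2 : Int) ^ k - 1) ≤ n ∧ n < 5 * ((2 : Int) ^ (k + 1) - 1) := by
  have hp : (0 : Int) < 2 ^ j := by positivity
  rw [loopA]
  by_cases h : 5 * ((2 : Int) ^ j - 1) + 2 ^ j * 5 ≤ n
  · have hsucc : (2 : Int) ^ (j + 1) = 2 ^ j * 2 := by ring
    have hj1 : 5 * ((2 : Int) ^ (j + 1) - 1) ≤ n := by rw [hsucc]; linarith
    obtain ⟨k, hk, hlo, hhi⟩ := loopA_spec n (j + 1) hj1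
    refine ⟨k, ?_, hlo, hhi⟩
    rw [dif_pos ⟨hp, h⟩]
    have e1 : 5 * ((2 : Int) ^ j - 1) + 2 ^ j * 5 = 5 * ((2 : Int) ^ (j + 1) - 1) := by ring
    have e2 : (2 : Int) ^ j * 2 = 2 ^ (j + 1) := by ring
    rw [e1, e2]; exact hk
  · refine ⟨j, ?_, hj, ?_⟩
    · rw [dif_neg (by tauto)]
    · have : (2 : Int) ^ (j + 1) = 2 ^ j * 2 := by ring
      omega
  termination_by (n - 5 * ((2 : Int) ^ j - 1)).toNat
  decreasing_by
    have hs : (2 : Int) ^ (j + 1) = 2 ^ j * 2 := by ring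
    rw [hs] at *
    omega

-- the exact boundaries determine the block index: it is bit_length(n/5 + 1) - 1
theorem block_index_eq (n : Int) (hn : 0 ≤ n) (k : Nat)
    (hlo : 5 * ((2 : Int) ^ k - 1) ≤ n) (hhi : n < 5 * ((2 : Int) ^ (k + 1) - 1)) :
    PySem.Int.bitLength (PySem.Int.floordiv n 5 + 1) - 1 = k := by
  rw [PySem.Int.floordiv_eq_ediv_of_pos (by omega)]
  set q : Int := n / 5 with hq
  have h5 : 5 * q ≤ n ∧ n < 5 * (q + 1) := by constructor <;> omega
  -- 2^k ≤ q+1 and q+1 ≤ 2^(k+1) - 1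
  have hks : (2 : Int) ^ (k + 1) = 2 ^ k * 2 := by ring
  have hb1 : (2 : Int) ^ k ≤ q + 1 := by nlinarith [h5.2]
  have hb2 : q + 1 < (2 : Int) ^ (k + 1) := by nlinarith [h5.1]
  -- move to Nat
  have hc1 : (((2 : Nat) ^ k : Nat) : Int) ≤ q + 1 := by push_cast; exact hb1
  have hc2 : q + 1 < (((2 : Nat) ^ (k + 1) : Nat) : Int) := by push_cast; exact hb2
  have hn1 : (2 : Nat) ^ k ≤ (q + 1).natAbs := by omega
  have hn2 : (q + 1).natAbs < (2 : Nat) ^ (k + 1) := by omega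
  have hne : q + 1 ≠ 0 := by omega
  have hL1 := PySem.Int.two_pow_bitLength_le (q + 1) hne
  have hL2 := PySem.Int.lt_two_pow_bitLength (q + 1)
  set L : Nat := PySem.Int.bitLength (q + 1) with hLdef
  -- 2^(L-1) ≤ natAbs < 2^L and 2^k ≤ natAbs < 2^(k+1) force L - 1 = k
  rcases Nat.lt_trichotomy (L - 1) k with hlt | heq | hgt
  · exfalso
    have hLk : L ≤ k := by omega
    have : (2 : Nat) ^ L ≤ 2 ^ k := Nat.pow_le_pow_right (by norm_num) hLk
    omega
  · exact heq
  · exfalso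
    have hLk : k + 1 ≤ L - 1 := by omega
    have : (2 : Nat) ^ (k + 1) ≤ 2 ^ (L - 1) := Nat.pow_le_pow_right (by norm_num) hLk
    omega

-- agreement of the two lookups for ans ∈ [0,5)
theorem lookup_eq (a : Int) (h0 : 0 ≤ a) (h5 : a < 5) :
    ((PySem.Dict.ofList [((0 : Int), "Sheldon"), (1, "Leonard"), (2, "Penny"), (3, "Rajesh"),
        (4, "Howard")]).get? a).getD ""
      = (PySem.List.pyGet? ["Sheldon", "Leonard", "Penny", "Rajesh", "Howard"] a).getD "" := by
  interval_cases a <;> decide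

-- ===== VERDICT (by name: the statement is the Claim_ definition above) =====
theorem f_spec : Claim_equal_f := by
  unfold Claim_equal_f
  intro n _hdom hpre
  unfold Spec_f f f_alt
  have hpre' : (1 : Int) ≤ n := hpre
  have hn' : (0 : Int) ≤ n - 1 := by omega
  obtain ⟨k, hloop, hlo, hhi⟩ := loopA_spec (n - 1) 0 (by norm_num; omega)
  simp only [pow_zero] at hloop
  norm_num at hloop
  simp only []
  rw [hloop, block_index_eq (n - 1) hn' k hlo hhi]
  have hip : (0 : Int) < 2 ^ k := by positivity
  have hks : (2 : Int) ^ (k + 1) = 2 ^ k * 2 := by ring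
  have hb0 : (0 : Int) ≤ PySem.Int.floordiv (n - 1 - 5 * ((2 : Int) ^ k - 1)) (2 ^ k) := by
    rw [PySem.Int.le_floordiv_iff_mul_le hip]; omega
  have hb5 : PySem.Int.floordiv (n - 1 - 5 * ((2 : Int) ^ k - 1)) (2 ^ k) < 5 := by
    rw [PySem.Int.floordiv_lt_iff_lt_mul hip]; omega
  exact lookup_eq _ hb0 hb5
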